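-- pv_equiv track=rewrite | github.com/alexbibov/lexgine | engine/preprocessing/util.py | signal_first
-- ===== SOURCE A (Python) =====
-- from typing import Iterable, Tuple, Any, List, Optional
--
-- def signal_first(series: Iterable) -> Iterable[Tuple[bool, Any]]:
--     it = iter(series)
--     try:
--         rv = next(it)
--         yield True, rv
--         for rv in it:
--             yield False, rv
--     except StopIteration:
--         return True, None
-- ===== SOURCE B (Python) =====
-- def signal_first(series):
--     first = True
--     for rv in series:
--         yield first, rv
--         first = False
-- ===== Notes on version B (the rewrite author's own statement) =====
-- stated objective: idiomatic
-- what changed: Replaced A's prime-and-loop (explicit next() for the first element inside try/except StopIteration, then a loop over the rest) with one uniform loop over all elements maintaining a boolean flag that is True only on the first iteration.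
import Mathlib
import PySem

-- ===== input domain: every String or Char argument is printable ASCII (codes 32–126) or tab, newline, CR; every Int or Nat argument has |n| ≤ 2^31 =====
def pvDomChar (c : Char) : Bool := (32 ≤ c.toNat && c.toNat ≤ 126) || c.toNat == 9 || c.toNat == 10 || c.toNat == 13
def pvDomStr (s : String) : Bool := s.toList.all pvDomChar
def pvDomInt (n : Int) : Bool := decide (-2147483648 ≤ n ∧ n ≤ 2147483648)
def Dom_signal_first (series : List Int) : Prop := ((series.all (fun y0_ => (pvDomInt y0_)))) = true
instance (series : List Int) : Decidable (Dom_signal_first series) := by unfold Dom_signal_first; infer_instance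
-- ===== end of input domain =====

-- B replaces A's prime-then-loop (next() under try/except plus a separate first yield) with one uniform flag-driven loop; idiomatic, same cost.
-- ===== PORT A =====
-- A primes the iterator: on empty input StopIteration is caught and nothing is yielded;
-- otherwise it yields (True, first) then (False, rv) for each remaining rv.
def signal_first (series : List Int) : List (Bool × Int) :=
  match series with
  | [] => []                    -- next(it) raises StopIteration, caught: generator yields nothing
  | rv :: it => (true, rv) :: it.map (fun x => (false, x))

-- ===== PORT B =====
-- one loop carrying the boolean flag `first`
def signalFirstGo (first : Bool) (series : List Int) : List (Bool × Int) :=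
  match series with
  | [] => []
  | rv :: rest => (first, rv) :: signalFirstGo false rest

def signal_first_alt (series : List Int) : List (Bool × Int) :=
  signalFirstGo true series

-- ===== PRECONDITION & SPEC =====
def Spec_signal_first (series : List Int) (out : List (Bool × Int)) : Prop := out = signal_first_alt series
instance (series : List Int) (out : List (Bool × Int)) : Decidable (Spec_signal_first series out) := by unfold Spec_signal_first; infer_instance

-- ===== CLAIM (what is proved, stated in full; the proofs are below) =====
def Claim_equal_signal_first : Prop := ∀ (series : List Int), Dom_signal_first series → Spec_signal_first series (signal_first series)

-- ===== LEMMAS AND PROOFS =====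

-- ===== VERDICT (by name: the statement is the Claim_ definition above) =====
theorem signalFirstGo_false_eq_map (l : List Int) :
    signalFirstGo false l = l.map (fun x => (false, x)) := by
  induction l with
  | nil => rfl
  | cons x xs ih => simp [signalFirstGo, ih]

theorem signal_first_spec : Claim_equal_signal_first := by
  intro series _
  unfold Spec_signal_first signal_first signal_first_alt
  cases series with
  | nil => rfl
  | cons x xs => simp [signalFirstGo, signalFirstGo_false_eq_map]
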